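-- pv_equiv track=rewrite | github.com/RaghavGupta23/cs166 | hw02/10.py | lookupreplace
-- ===== SOURCE A (Python) =====
-- def lookupreplace(ciphertext, lookup):
--     result = ""
--     for cipherletter in ciphertext:
--         if cipherletter >= 'A' and cipherletter <= 'Z':
--             if cipherletter in lookup:
--                 result += lookup[cipherletter]
--             else:
--                 result += ' '
--         else:
--             result += cipherletter
--     return result
-- ===== SOURCE B (Python) =====
-- def lookupreplace(ciphertext, lookup):
--     table = {ord(c): lookup.get(c, ' ') for c in map(chr, range(65, 91))}
--     return ciphertext.translate(table)
-- ===== Notes on version B (the rewrite author's own statement) =====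
-- stated objective: idiomatic
-- what changed: Replaces the per-character branch-and-concatenate loop with a precomputed 26-entry translation table (ord -> replacement or ' ') applied in a single str.translate pass.
import Mathlib
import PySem

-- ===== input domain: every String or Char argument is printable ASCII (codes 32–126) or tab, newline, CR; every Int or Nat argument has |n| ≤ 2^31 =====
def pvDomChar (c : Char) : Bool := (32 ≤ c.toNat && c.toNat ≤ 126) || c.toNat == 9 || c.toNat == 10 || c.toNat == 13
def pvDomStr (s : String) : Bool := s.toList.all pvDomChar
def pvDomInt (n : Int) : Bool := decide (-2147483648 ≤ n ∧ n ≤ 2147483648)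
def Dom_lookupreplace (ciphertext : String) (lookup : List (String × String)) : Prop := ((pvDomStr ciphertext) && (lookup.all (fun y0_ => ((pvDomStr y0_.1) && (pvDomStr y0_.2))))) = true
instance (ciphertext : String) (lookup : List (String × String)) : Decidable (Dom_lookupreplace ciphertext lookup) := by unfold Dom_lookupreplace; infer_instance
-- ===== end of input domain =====

-- B replaces A's per-character branch-and-append loop by a precomputed 26-entry
-- translation table (ord(letter) -> replacement) applied in one str.translate pass (objective: idiomatic).

-- ===== PORT A =====
-- literal port of A's loop: string accumulator as List Char, same branches in the same order
def lookupreplace (ciphertext : String) (lookup : List (String × String)) : String :=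
  String.mk (ciphertext.toList.foldl (fun result c =>
    if 'A' ≤ c ∧ c ≤ 'Z' then
      match (PySem.Dict.mk lookup).get? (String.mk [c]) with
      | some v => result ++ v.toList        -- 'cipherletter in lookup' then 'lookup[cipherletter]'
      | none => result ++ [' ']
    else result ++ [c]) [])

-- ===== PORT B =====
-- the translation table of Source B: {ord(c): lookup.get(c, ' ') for c in map(chr, range(65, 91))}
def pvTable_lookupreplace (lookup : List (String × String)) : PySem.Dict Char String :=
  (PySem.List.pyRange 65 91 1).foldl
    (fun d i =>
      let c := Char.ofNat i.toNat
      d.insert c ((PySem.Dict.mk lookup).getD (String.mk [c]) " "))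
    PySem.Dict.empty

-- str.translate ported by hand (exact for a str-valued table): each character is
-- replaced by its table entry, characters absent from the table are kept.
def lookupreplace_alt (ciphertext : String) (lookup : List (String × String)) : String :=
  let table := pvTable_lookupreplace lookup
  String.mk ((ciphertext.toList.map (fun ch =>
    match table.get? ch with
    | some s => s.toList
    | none => [ch])).flatten)

-- ===== PRECONDITION & SPEC =====
def Spec_lookupreplace (ciphertext : String) (lookup : List (String × String)) (out : String) : Prop := out = lookupreplace_alt ciphertext lookup
instance (ciphertext : String) (lookup : List (String × String)) (out : String) : Decidable (Spec_lookupreplace ciphertext lookup out) := by unfold Spec_lookupreplace; infer_instance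

-- ===== CLAIM (what is proved, stated in full; the proofs are below) =====
def Claim_equal_lookupreplace : Prop := ∀ (ciphertext : String) (lookup : List (String × String)), Dom_lookupreplace ciphertext lookup → Spec_lookupreplace ciphertext lookup (lookupreplace ciphertext lookup)

-- ===== LEMMAS AND PROOFS =====

-- the per-character replacement both programs implement
def pvStep (lookup : List (String × String)) (c : Char) : List Char :=
  if 'A' ≤ c ∧ c ≤ 'Z' then
    match (PySem.Dict.mk lookup).get? (String.mk [c]) with
    | some v => v.toList
    | none => [' ']
  else [c]

-- get? after a foldl-insert loop: the LAST matching insert wins, i.e. find? on the reversed list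
theorem pv_get?_foldl_insert (k : Int → Char) (g : Int → String)
    (l : List Int) (d : PySem.Dict Char String) (ch : Char) :
    (l.foldl (fun d i => d.insert (k i) (g i)) d).get? ch =
      (match l.reverse.find? (fun i => k i == ch) with
        | some i => some (g i)
        | none => d.get? ch) := by
  induction l using List.reverseRecOn with
  | nil => simp
  | append_singleton l i ih =>
    rw [List.foldl_append, List.foldl_cons, List.foldl_nil, List.reverse_append,
      List.reverse_singleton, List.singleton_append, List.find?_cons]
    by_cases h : k i = ch
    · simp [h, PySem.Dict.get?_insert_self]
    · have hb : (k i == ch) = false := by simp [h]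
      rw [hb, PySem.Dict.get?_insert_of_ne _ _ (Ne.symm h), ih]

-- find? with a predicate that characterises a unique element
theorem pv_find?_unique (p : Int → Bool) (x : Int) (l : List Int)
    (h : ∀ i ∈ l, p i = true ↔ i = x) :
    l.find? p = if x ∈ l then some x else none := by
  induction l with
  | nil => simp
  | cons i l ih =>
    rw [List.find?_cons]
    by_cases hp : p i = true
    · have : i = x := (h i (by simp)).mp hp
      subst this
      simp [hp]
    · have hb : p i = false := by simpa using hp
      rw [hb, ih (fun j hj => h j (by simp [hj]))]
      have hne : i ≠ x := fun he => hp ((h i (by simp)).mpr he)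
      simp only [List.mem_cons]
      have : ¬ (x = i) := fun he => hne he.symm
      simp [this]

theorem pv_chr_toNat (n : Nat) (h : n < 55296) : (Char.ofNat n).toNat = n := by
  simp [Char.ofNat, Char.toNat, h, Nat.isValidChar, Char.ofNatAux]

theorem pv_table_get? (lookup : List (String × String)) (ch : Char) :
    (pvTable_lookupreplace lookup).get? ch =
      if 'A' ≤ ch ∧ ch ≤ 'Z'
      then some ((PySem.Dict.mk lookup).getD (String.mk [ch]) " ")
      else none := by
  unfold pvTable_lookupreplace
  rw [show (fun (d : PySem.Dict Char String) (i : Int) =>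
        let c := Char.ofNat i.toNat
        d.insert c ((PySem.Dict.mk lookup).getD (String.mk [c]) " "))
      = fun d i => d.insert (Char.ofNat i.toNat)
          ((PySem.Dict.mk lookup).getD (String.mk [Char.ofNat i.toNat]) " ") from rfl]
  rw [pv_get?_foldl_insert]
  rw [pv_find?_unique _ ((ch.toNat : Int)) _ ?_]
  · have htc : ((ch.toNat : Int)).toNat = ch.toNat := Int.toNat_natCast _
    by_cases h : 'A' ≤ ch ∧ ch ≤ 'Z'
    · have hn : (65 : Nat) ≤ ch.toNat ∧ ch.toNat ≤ 90 := ⟨h.1, h.2⟩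
      have hmem : ((ch.toNat : Int)) ∈ (PySem.List.pyRange 65 91 1).reverse := by
        rw [List.mem_reverse, PySem.List.mem_pyRange_one]
        omega
      rw [if_pos hmem, if_pos h]
      simp [htc, Char.ofNat_toNat]
    · have hn : ¬ ((65 : Nat) ≤ ch.toNat ∧ ch.toNat ≤ 90) := by
        intro hc
        exact h ⟨hc.1, hc.2⟩
      have hmem : ((ch.toNat : Int)) ∉ (PySem.List.pyRange 65 91 1).reverse := by
        rw [List.mem_reverse, PySem.List.mem_pyRange_one]
        omega
      rw [if_neg hmem, if_neg h]
      simp [PySem.Dict.get?_empty]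
  · intro i hi
    rw [List.mem_reverse, PySem.List.mem_pyRange_one] at hi
    have hv : i.toNat < 55296 := by omega
    constructor
    · intro hp
      have he : Char.ofNat i.toNat = ch := by simpa using hp
      have : i.toNat = ch.toNat := by rw [← he, pv_chr_toNat _ hv]
      omega
    · intro he
      subst he
      have : ((ch.toNat : Int)).toNat = ch.toNat := Int.toNat_natCast _
      rw [this, Char.ofNat_toNat]
      simp

theorem pv_alt_char (lookup : List (String × String)) (ch : Char) :
    (match (pvTable_lookupreplace lookup).get? ch with
      | some s => s.toList
      | none => [ch]) = pvStep lookup ch := by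
  rw [pv_table_get?]
  unfold pvStep
  by_cases h : 'A' ≤ ch ∧ ch ≤ 'Z'
  · rw [if_pos h, if_pos h]
    cases hg : (PySem.Dict.mk lookup).get? (String.mk [ch]) with
    | some v => simp [PySem.Dict.getD_eq_get?_getD, hg]
    | none => simp [PySem.Dict.getD_eq_get?_getD, hg]
  · rw [if_neg h, if_neg h]

theorem pv_foldl_append (f : Char → List Char) (l : List Char) (acc : List Char) :
    l.foldl (fun r c => r ++ f c) acc = acc ++ (l.map f).flatten := by
  induction l generalizing acc with
  | nil => simp
  | cons c l ih => simp [List.foldl_cons, ih, List.append_assoc]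

theorem pv_A_eq (ciphertext : String) (lookup : List (String × String)) :
    lookupreplace ciphertext lookup =
      String.mk ((ciphertext.toList.map (pvStep lookup)).flatten) := by
  unfold lookupreplace
  rw [show (fun (result : List Char) (c : Char) =>
      if 'A' ≤ c ∧ c ≤ 'Z' then
        match (PySem.Dict.mk lookup).get? (String.mk [c]) with
        | some v => result ++ v.toList
        | none => result ++ [' ']
      else result ++ [c]) = fun result c => result ++ pvStep lookup c from by
    funext r c
    unfold pvStep
    by_cases h : 'A' ≤ c ∧ c ≤ 'Z'
    · rw [if_pos h, if_pos h]
      cases (PySem.Dict.mk lookup).get? (String.mk [c]) <;> rfl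
    · rw [if_neg h, if_neg h]]
  rw [pv_foldl_append]
  rfl

theorem pv_B_eq (ciphertext : String) (lookup : List (String × String)) :
    lookupreplace_alt ciphertext lookup =
      String.mk ((ciphertext.toList.map (pvStep lookup)).flatten) := by
  unfold lookupreplace_alt
  refine congrArg String.mk (congrArg List.flatten ?_)
  exact List.map_congr_left (fun ch _ => pv_alt_char lookup ch)

-- ===== VERDICT (by name: the statement is the Claim_ definition above) =====
theorem lookupreplace_spec : Claim_equal_lookupreplace := by
  intro ciphertext lookup _
  show lookupreplace ciphertext lookup = lookupreplace_alt ciphertext lookup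
  rw [pv_A_eq, pv_B_eq]
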